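-- pv_equiv track=rewrite | github.com/jchy20/how-much-backtrack | reasoning-gym/reasoning_gym/arc/arc_1d_tasks.py | transform_block_and_noise_remove
-- ===== SOURCE A (Python) =====
-- def transform_block_and_noise_remove(input_grid: list[int]) -> list[int]:
--     size = len(input_grid)
--     # Identify the block color (the only non-zero value in the grid)
--     nonzero_colors = {v for v in input_grid if v != 0}
--     if not nonzero_colors:
--         # nothing to remove
--         return input_grid.copy()
--     if len(nonzero_colors) > 1:
--         raise ValueError("Expected only one non-zero color in the input grid.")
--     color = nonzero_colors.pop()
--
--     # Find all indices of that color
--     indices = [i for i, v in enumerate(input_grid) if v == color]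
--     if not indices:
--         return input_grid.copy()
--
--     # Group into contiguous runs: list of (start_idx, length)
--     runs = []
--     run_start = indices[0]
--     run_len = 1
--     for prev, curr in zip(indices, indices[1:]):
--         if curr == prev + 1:
--             run_len += 1
--         else:
--             runs.append((run_start, run_len))
--             run_start = curr
--             run_len = 1
--     runs.append((run_start, run_len))
--
--     # The true block is the longest run (length ≥ 2)
--     block_run = max(runs, key=lambda x: x[1])
--     if block_run[1] < 2:
--         raise ValueError("No contiguous block of size ≥ 2 found.")
--     # Noise runs are all other runs of length == 1
--     noise_positions = [start for start, length in runs if length == 1]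
--
--     # Build the answer: copy input, zero out noise positions
--     output = input_grid.copy()
--     for pos in noise_positions:
--         output[pos] = 0
--
--     return output
-- ===== SOURCE B (Python) =====
-- def transform_block_and_noise_remove(input_grid: list[int]) -> list[int]:
--     nonzero_colors = {v for v in input_grid if v != 0}
--     if not nonzero_colors:
--         return input_grid.copy()
--     if len(nonzero_colors) > 1:
--         raise ValueError("Expected only one non-zero color in the input grid.")
--     color = nonzero_colors.pop()
--     n = len(input_grid)
--
--     def nb(i: int) -> bool:
--         # True iff i is a valid index holding the color
--         return 0 <= i < n and input_grid[i] == color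
--
--     has_block = any(
--         input_grid[i] == color and (nb(i - 1) or nb(i + 1)) for i in range(n)
--     )
--     if not has_block:
--         raise ValueError("No contiguous block of size ≥ 2 found.")
--
--     return [
--         0 if input_grid[i] == color and not nb(i - 1) and not nb(i + 1) else input_grid[i]
--         for i in range(n)
--     ]
-- ===== Notes on version B (the rewrite author's own statement) =====
-- stated objective: simpler
-- what changed: Replaces the index-list/run-grouping/max-scan pipeline with a single neighbor-local pass: a nonzero cell is noise iff neither neighbor has the color, and the block-existence check is 'some cell has a same-color neighbor'; same early returns and the same two ValueErrors.
import Mathlib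
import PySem

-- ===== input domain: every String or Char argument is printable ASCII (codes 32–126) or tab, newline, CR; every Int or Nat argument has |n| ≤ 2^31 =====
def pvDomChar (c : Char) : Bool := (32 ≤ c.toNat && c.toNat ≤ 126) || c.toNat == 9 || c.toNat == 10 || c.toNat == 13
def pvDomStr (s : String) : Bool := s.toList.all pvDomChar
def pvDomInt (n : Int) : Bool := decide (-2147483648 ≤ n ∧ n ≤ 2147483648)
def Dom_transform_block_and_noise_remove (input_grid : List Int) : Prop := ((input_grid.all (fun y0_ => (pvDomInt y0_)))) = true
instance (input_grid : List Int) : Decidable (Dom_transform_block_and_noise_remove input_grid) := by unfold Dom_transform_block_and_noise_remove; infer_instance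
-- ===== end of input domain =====

-- B zeroes isolated color cells by a neighbor-local pass instead of A's run-grouping; equal wherever A returns (Pre_).

-- ===== PORT A =====
def transform_block_and_noise_remove (input_grid : List Int) : List Int :=
  let nonzero_colors : PySem.Set Int := PySem.Set.ofList (input_grid.filter (fun v => decide (v ≠ 0)))
  if nonzero_colors.isEmpty then input_grid
  else if 1 < nonzero_colors.length then []  -- raise ValueError (excluded by Pre_)
  else
    let color := nonzero_colors.headD 0      -- .pop() of a singleton set
    let indices := ((PySem.List.enumerate input_grid 0).filter (fun p => decide (p.2 = color))).map Prod.fst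
    match indices with
    | [] => input_grid
    | i0 :: rest =>
      let st := ((i0 :: rest).zip rest).foldl
        (fun (st : List (Int × Int) × Int × Int) pc =>
          if pc.2 = pc.1 + 1 then (st.1, st.2.1, st.2.2 + 1)
          else (st.1 ++ [(st.2.1, st.2.2)], pc.2, 1))
        ([], i0, 1)
      let runs := st.1 ++ [(st.2.1, st.2.2)]
      match PySem.List.max? runs (fun r => r.2) with
      | none => []                            -- unreachable: runs is nonempty
      | some block_run =>
        if block_run.2 < 2 then []            -- raise ValueError (excluded by Pre_)
        else
          let noise_positions := (runs.filter (fun r => decide (r.2 = 1))).map Prod.fst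
          noise_positions.foldl (fun out pos => PySem.List.pySetD out pos 0) input_grid

-- ===== PORT B =====
-- nb(i): i is a valid index holding the color
def tbnrAltNb (g : List Int) (color : Int) (i : Int) : Bool :=
  decide (0 ≤ i) && decide (i < (g.length : Int)) && (PySem.List.pyGetD g i 0 == color)

def transform_block_and_noise_remove_alt (input_grid : List Int) : List Int :=
  let nonzero_colors : PySem.Set Int := PySem.Set.ofList (input_grid.filter (fun v => decide (v ≠ 0)))
  if nonzero_colors.isEmpty then input_grid
  else if 1 < nonzero_colors.length then []   -- raise ValueError (excluded by Pre_)
  else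
    let color := nonzero_colors.headD 0       -- .pop() of a singleton set
    let n : Int := input_grid.length
    let has_block := (PySem.List.pyRange 0 n 1).any (fun i =>
      (PySem.List.pyGetD input_grid i 0 == color)
        && (tbnrAltNb input_grid color (i-1) || tbnrAltNb input_grid color (i+1)))
    if !has_block then []                     -- raise ValueError (excluded by Pre_)
    else (PySem.List.pyRange 0 n 1).map (fun i =>
      if (PySem.List.pyGetD input_grid i 0 == color)
          && !tbnrAltNb input_grid color (i-1) && !tbnrAltNb input_grid color (i+1)
      then 0 else PySem.List.pyGetD input_grid i 0)

-- ===== PRECONDITION & SPEC =====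
-- Pre_ excludes exactly the inputs on which A raises ValueError: more than one distinct
-- nonzero value, or some nonzero exists but no two adjacent equal nonzero cells (every
-- nonzero cell isolated).  B raises on exactly the same inputs.
def Pre_transform_block_and_noise_remove (input_grid : List Int) : Prop :=
  (∀ a ∈ input_grid, ∀ b ∈ input_grid, a ≠ 0 → b ≠ 0 → a = b) ∧
  ((∀ v ∈ input_grid, v = 0) ∨ ∃ p ∈ input_grid.zip input_grid.tail, p.1 ≠ 0 ∧ p.1 = p.2)
instance (input_grid : List Int) : Decidable (Pre_transform_block_and_noise_remove input_grid) := by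
  unfold Pre_transform_block_and_noise_remove; infer_instance
def pvWitness_transform_block_and_noise_remove : List Int := [0, 3, 3, 0, 3]

def Spec_transform_block_and_noise_remove (input_grid : List Int) (out : List Int) : Prop := out = transform_block_and_noise_remove_alt input_grid
instance (input_grid : List Int) (out : List Int) : Decidable (Spec_transform_block_and_noise_remove input_grid out) := by unfold Spec_transform_block_and_noise_remove; infer_instance

-- ===== CLAIM (what is proved, stated in full; the proofs are below) =====
def Claim_equal_transform_block_and_noise_remove : Prop := ∀ (input_grid : List Int), Dom_transform_block_and_noise_remove input_grid → Pre_transform_block_and_noise_remove input_grid → Spec_transform_block_and_noise_remove input_grid (transform_block_and_noise_remove input_grid)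

-- ===== LEMMAS AND PROOFS =====

-- proof-only model of A's run grouping: recursion on the index list, carrying prev/run_start/run_len
def tbnrRuns (prev rs rl : Int) : List Int → List (Int × Int)
  | [] => [(rs, rl)]
  | x :: xs => if x = prev + 1 then tbnrRuns x rs (rl+1) xs else (rs, rl) :: tbnrRuns x x 1 xs

def tbnrIval (r : Int × Int) : List Int := PySem.List.pyRange r.1 (r.1 + r.2) 1

lemma tbnr_mem_ival {s l q : Int} : q ∈ tbnrIval (s, l) ↔ s ≤ q ∧ q < s + l := by
  simp [tbnrIval, PySem.List.mem_pyRange_one]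

lemma tbnr_mem_flat {R : List (Int × Int)} {q : Int} :
    q ∈ R.flatMap tbnrIval ↔ ∃ r ∈ R, r.1 ≤ q ∧ q < r.1 + r.2 := by
  rw [List.mem_flatMap]
  constructor
  · rintro ⟨r, hr, hq⟩; exact ⟨r, hr, (tbnr_mem_ival (s := r.1) (l := r.2)).1 hq⟩
  · rintro ⟨r, hr, hq⟩; exact ⟨r, hr, (tbnr_mem_ival (s := r.1) (l := r.2)).2 hq⟩

lemma tbnr_fold_eq_runs (rest : List Int) : ∀ (prev rs rl : Int) (acc : List (Int × Int)),
    (let st := ((prev :: rest).zip rest).foldl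
        (fun (st : List (Int × Int) × Int × Int) pc =>
          if pc.2 = pc.1 + 1 then (st.1, st.2.1, st.2.2 + 1)
          else (st.1 ++ [(st.2.1, st.2.2)], pc.2, 1))
        (acc, rs, rl) ;
     st.1 ++ [(st.2.1, st.2.2)]) = acc ++ tbnrRuns prev rs rl rest := by
  induction rest with
  | nil => intro prev rs rl acc; simp [tbnrRuns]
  | cons x xs ih =>
    intro prev rs rl acc
    simp only [List.zip_cons_cons, List.foldl_cons, tbnrRuns]
    by_cases h : x = prev + 1
    · subst h
      simpa using ih (prev + 1) rs (rl + 1) acc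
    · simp only [if_neg h]
      simpa using ih x x 1 (acc ++ [(rs, rl)])

lemma tbnr_runs_struct (xs : List Int) : ∀ (prev rs rl : Int),
    rs + rl = prev + 1 → 1 ≤ rl → List.IsChain (· < ·) (prev :: xs) →
    (tbnrRuns prev rs rl xs).flatMap tbnrIval = tbnrIval (rs, rl) ++ xs ∧
    List.IsChain (fun a b : Int × Int => a.1 + a.2 < b.1) (tbnrRuns prev rs rl xs) ∧
    (∀ r ∈ tbnrRuns prev rs rl xs, 1 ≤ r.2) ∧
    (∃ l' t, tbnrRuns prev rs rl xs = (rs, l') :: t) := by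
  induction xs with
  | nil =>
    intro prev rs rl h1 h2 _
    refine ⟨by simp [tbnrRuns], by simp [tbnrRuns], ?_, ⟨rl, [], rfl⟩⟩
    intro r hr; simp [tbnrRuns] at hr; subst hr; exact h2
  | cons x xs ih =>
    intro prev rs rl h1 h2 hch
    rw [List.isChain_cons_cons] at hch
    obtain ⟨hlt, hch⟩ := hch
    by_cases h : x = prev + 1
    · subst h
      have hrec := ih (prev + 1) rs (rl + 1) (by omega) (by omega) hch
      have hunf : tbnrRuns prev rs rl ((prev + 1) :: xs) = tbnrRuns (prev + 1) rs (rl + 1) xs := by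
        simp [tbnrRuns]
      rw [hunf]
      refine ⟨?_, hrec.2.1, hrec.2.2.1, ?_⟩
      · rw [hrec.1]
        have hiv : tbnrIval (rs, rl + 1) = tbnrIval (rs, rl) ++ [prev + 1] := by
          simp only [tbnrIval]
          rw [show rs + (rl + 1) = (rs + rl) + 1 by ring,
              PySem.List.pyRange_one_succ_right (by omega), h1]
        rw [hiv]; simp
      · obtain ⟨l', t, ht⟩ := hrec.2.2.2
        exact ⟨l', t, ht⟩
    · have hxp : prev + 1 < x := by rcases lt_or_gt_of_ne h with h' | h' <;> omega
      have hrec := ih x x 1 (by ring) (by omega) hch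
      have hunf : tbnrRuns prev rs rl (x :: xs) = (rs, rl) :: tbnrRuns x x 1 xs := by
        simp [tbnrRuns, if_neg h]
      rw [hunf]
      obtain ⟨l', t, ht⟩ := hrec.2.2.2
      refine ⟨?_, ?_, ?_, ⟨rl, _, rfl⟩⟩
      · rw [List.flatMap_cons, hrec.1]
        have hx1 : tbnrIval (x, 1) = [x] := by
          rw [tbnrIval]
          rw [PySem.List.pyRange_one_cons (show x < x + 1 by omega),
              PySem.List.pyRange_one_eq_nil (le_refl (x + 1))]
        rw [hx1]; simp
      · rw [ht, List.isChain_cons_cons]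
        exact ⟨by simp; omega, by rw [← ht]; exact hrec.2.1⟩
      · intro r hr
        rcases List.mem_cons.mp hr with h' | h'
        · subst h'; exact h2
        · exact hrec.2.2.1 r h'

lemma tbnr_lb (R : List (Int × Int)) : ∀ (s l : Int), (∀ r ∈ R, 1 ≤ r.2) →
    List.IsChain (fun a b : Int × Int => a.1 + a.2 < b.1) ((s, l) :: R) →
    ∀ r ∈ R, s + l < r.1 := by
  induction R with
  | nil => intro s l _ _ r hr; simp at hr
  | cons b R ih =>
    intro s l hlen hch r hr
    rw [List.isChain_cons_cons] at hch
    rcases List.mem_cons.mp hr with h' | h'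
    · subst h'; exact hch.1
    · have hb : 1 ≤ b.2 := hlen b (by simp)
      have := ih b.1 b.2 (fun r hr => hlen r (by simp [hr])) (by simpa using hch.2) r h'
      have h1 : s + l < b.1 := hch.1
      omega

lemma tbnr_isolated (R : List (Int × Int)) :
    (∀ r ∈ R, 1 ≤ r.2) →
    List.IsChain (fun a b : Int × Int => a.1 + a.2 < b.1) R →
    ∀ p : Int, ((p, (1 : Int)) ∈ R ↔
      p ∈ R.flatMap tbnrIval ∧ (p - 1) ∉ R.flatMap tbnrIval ∧ (p + 1) ∉ R.flatMap tbnrIval) := by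
  induction R with
  | nil => intro _ _ p; simp
  | cons a R ih =>
    intro hlen hch p
    obtain ⟨s, l⟩ := a
    have hsplit : ∀ q : Int, (q ∈ ((s, l) :: R).flatMap tbnrIval ↔
        (s ≤ q ∧ q < s + l) ∨ q ∈ R.flatMap tbnrIval) := by
      intro q; rw [List.flatMap_cons, List.mem_append, tbnr_mem_ival]
    have hl : (1 : Int) ≤ l := hlen (s, l) (by simp)
    have hlen' : ∀ r ∈ R, 1 ≤ r.2 := fun r hr => hlen r (by simp [hr])
    have hch' : List.IsChain (fun a b : Int × Int => a.1 + a.2 < b.1) R := hch.tail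
    have hlb : ∀ r ∈ R, s + l < r.1 := tbnr_lb R s l hlen' hch
    have hlbm : ∀ q ∈ R.flatMap tbnrIval, s + l < q := by
      intro q hq
      obtain ⟨r, hr, h1, h2⟩ := tbnr_mem_flat.mp hq
      have := hlb r hr; omega
    have hIH := ih hlen' hch' p
    rw [hsplit p, hsplit (p - 1), hsplit (p + 1)]
    constructor
    · intro hmem
      rcases List.mem_cons.mp hmem with h' | h'
      · obtain ⟨hs, hl1⟩ := Prod.mk.injEq .. ▸ h'
        subst hs; subst hl1
        refine ⟨Or.inl (by omega), ?_, ?_⟩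
        · rintro (h | h)
          · omega
          · have := hlbm _ h; omega
        · rintro (h | h)
          · omega
          · have := hlbm _ h; omega
      · have h3 := hIH.1 h'
        have hp : s + l < p := by simpa using hlb (p, 1) h'
        refine ⟨Or.inr h3.1, ?_, ?_⟩
        · rintro (h | h)
          · omega
          · exact h3.2.1 h
        · rintro (h | h)
          · omega
          · exact h3.2.2 h
    · rintro ⟨h1, h2, h3⟩
      rcases h1 with hc' | hc'
      · have hl1 : l = 1 := by
          by_contra hne
          rcases lt_or_ge p (s + l - 1) with hp | hp
          · exact h3 (Or.inl (by omega))
          · exact h2 (Or.inl (by omega))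
        have hps : p = s := by omega
        subst hps; subst hl1; exact List.mem_cons_self
      · have hp : s + l < p := hlbm p hc'
        exact List.mem_cons.mpr (Or.inr (hIH.2 ⟨hc',
          fun hc => h2 (Or.inr hc), fun hc => h3 (Or.inr hc)⟩))

lemma tbnr_big_run (R : List (Int × Int)) :
    (∀ r ∈ R, 1 ≤ r.2) →
    List.IsChain (fun a b : Int × Int => a.1 + a.2 < b.1) R →
    ((∃ r ∈ R, 2 ≤ r.2) ↔ ∃ p : Int, p ∈ R.flatMap tbnrIval ∧ (p + 1) ∈ R.flatMap tbnrIval) := by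
  induction R with
  | nil => intro _ _; simp
  | cons a R ih =>
    intro hlen hch
    obtain ⟨s, l⟩ := a
    have hsplit : ∀ q : Int, (q ∈ ((s, l) :: R).flatMap tbnrIval ↔
        (s ≤ q ∧ q < s + l) ∨ q ∈ R.flatMap tbnrIval) := by
      intro q; rw [List.flatMap_cons, List.mem_append, tbnr_mem_ival]
    have hl : (1 : Int) ≤ l := hlen (s, l) (by simp)
    have hlen' : ∀ r ∈ R, 1 ≤ r.2 := fun r hr => hlen r (by simp [hr])
    have hch' : List.IsChain (fun a b : Int × Int => a.1 + a.2 < b.1) R := hch.tail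
    have hlb : ∀ r ∈ R, s + l < r.1 := tbnr_lb R s l hlen' hch
    have hlbm : ∀ q ∈ R.flatMap tbnrIval, s + l < q := by
      intro q hq
      obtain ⟨r, hr, h1, h2⟩ := tbnr_mem_flat.mp hq
      have := hlb r hr; omega
    have hIH := ih hlen' hch'
    constructor
    · rintro ⟨r, hr, h2⟩
      rcases List.mem_cons.mp hr with h' | h'
      · subst h'
        exact ⟨s, (hsplit s).mpr (Or.inl (by omega)), (hsplit (s+1)).mpr (Or.inl (by omega))⟩
      · obtain ⟨p, hp1, hp2⟩ := hIH.1 ⟨r, h', h2⟩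
        exact ⟨p, (hsplit p).mpr (Or.inr hp1), (hsplit (p+1)).mpr (Or.inr hp2)⟩
    · rintro ⟨p, hp1, hp2⟩
      rcases (hsplit p).mp hp1 with hc | hc
      · rcases (hsplit (p+1)).mp hp2 with hd | hd
        · exact ⟨(s, l), List.mem_cons_self, by simp; omega⟩
        · have := hlbm _ hd; omega
      · have hsl : s + l < p := hlbm _ hc
        rcases (hsplit (p+1)).mp hp2 with hd | hd
        · omega
        · obtain ⟨r, hr, h2⟩ := hIH.2 ⟨p, hc, hd⟩
          exact ⟨r, by simp [hr], h2⟩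

lemma tbnr_ival_one (s : Int) : tbnrIval (s, 1) = [s] := by
  rw [tbnrIval]
  rw [PySem.List.pyRange_one_cons (show s < s + 1 by omega),
      PySem.List.pyRange_one_eq_nil (le_refl (s + 1))]

lemma tbnr_idx_mem (g : List Int) (c : Int) (i : Int) :
    i ∈ ((PySem.List.enumerate g 0).filter (fun p => decide (p.2 = c))).map Prod.fst ↔
      (0 ≤ i ∧ i < (g.length : Int) ∧ PySem.List.pyGetD g i 0 = c) := by
  rw [List.mem_map]
  constructor
  · rintro ⟨p, hp, rfl⟩
    rw [List.mem_filter] at hp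
    obtain ⟨hp1, hp2⟩ := hp
    obtain ⟨k, hk, rfl⟩ := (PySem.List.mem_enumerate_iff _ _ _).mp hp1
    simp only [decide_eq_true_eq] at hp2
    refine ⟨by omega, by simpa using hk, ?_⟩
    have : (0 : Int) + (k : Int) = (k : Int) := by omega
    rw [this, PySem.List.pyGetD_natCast, List.getD_eq_getElem _ _ hk]
    exact hp2
  · rintro ⟨h0, hn, hv⟩
    refine ⟨(i, c), List.mem_filter.mpr ⟨?_, by simp⟩, rfl⟩
    rw [PySem.List.mem_enumerate_iff]
    refine ⟨i.toNat, by omega, ?_⟩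
    have h1 : (0 : Int) + (i.toNat : Int) = i := by omega
    rw [h1]
    have := PySem.List.pyGetD_eq_getElem (xs := g) (i := i) (d := 0) h0 hn
    rw [this] at hv
    rw [hv]

lemma tbnr_idx_chain (g : List Int) (c : Int) :
    List.IsChain (· < ·) (((PySem.List.enumerate g 0).filter (fun p => decide (p.2 = c))).map Prod.fst) := by
  apply List.Pairwise.isChain
  apply List.Pairwise.map (R := fun (p q : Int × Int) => p.1 < q.1) Prod.fst (fun a b h => h)
  exact (PySem.List.pairwise_lt_enumerate g 0).filter _

lemma tbnr_setlen (ps : List Int) : ∀ (out : List Int),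
    (ps.foldl (fun o p => PySem.List.pySetD o p 0) out).length = out.length := by
  induction ps with
  | nil => intro out; rfl
  | cons x ps ih => intro out; rw [List.foldl_cons, ih, PySem.List.length_pySetD]

lemma tbnr_setget (ps : List Int) : ∀ (out : List Int) (j : Nat) (hj : j < out.length),
    (∀ p ∈ ps, 0 ≤ p) →
    (ps.foldl (fun o p => PySem.List.pySetD o p 0) out)[j]'(by rw [tbnr_setlen]; exact hj) =
      if (↑j : Int) ∈ ps then 0 else out[j] := by
  induction ps with
  | nil => intro out j hj _; simp
  | cons x ps ih =>
    intro out j hj hpos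
    have hx : 0 ≤ x := hpos x (by simp)
    have hset : PySem.List.pySetD out x 0 = out.set x.toNat 0 := PySem.List.pySetD_of_nonneg out 0 hx
    have hlen : j < (PySem.List.pySetD out x 0).length := by rw [PySem.List.length_pySetD]; exact hj
    have := ih (PySem.List.pySetD out x 0) j hlen (fun p hp => hpos p (by simp [hp]))
    simp only [List.foldl_cons]
    rw [this]
    by_cases hmem : (↑j : Int) ∈ ps
    · simp [hmem]
    · rw [if_neg hmem]
      simp only [hset]
      rw [List.getElem_set]
      by_cases hxe : (↑j : Int) = x
      · rw [if_pos (by omega), if_pos (by simp [hxe])]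
      · rw [if_neg (by omega), if_neg (by simp [List.mem_cons, hxe, hmem])]

lemma tbnr_nb_iff (g : List Int) (c : Int) (i : Int) :
    tbnrAltNb g c i = true ↔ (0 ≤ i ∧ i < (g.length : Int) ∧ PySem.List.pyGetD g i 0 = c) := by
  simp [tbnrAltNb, and_assoc]

-- ===== VERDICT (by name: the statement is the Claim_ definition above) =====
theorem transform_block_and_noise_remove_spec : Claim_equal_transform_block_and_noise_remove := by
  intro g _ hpre
  show transform_block_and_noise_remove g = transform_block_and_noise_remove_alt g
  unfold transform_block_and_noise_remove transform_block_and_noise_remove_alt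
  simp only []
  by_cases hemp : (PySem.Set.ofList (g.filter (fun v => decide (v ≠ 0)))).isEmpty
  · rw [if_pos hemp, if_pos hemp]
  · rw [if_neg hemp, if_neg hemp]
    by_cases hlen : 1 < (PySem.Set.ofList (g.filter (fun v => decide (v ≠ 0)))).length
    · rw [if_pos hlen, if_pos hlen]
    · rw [if_neg hlen, if_neg hlen]
      -- the single nonzero color
      set c : Int := (PySem.Set.ofList (g.filter (fun v => decide (v ≠ 0)))).headD 0 with hc
      have hSne : PySem.Set.ofList (g.filter (fun v => decide (v ≠ 0))) ≠ [] := by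
        intro h; rw [List.isEmpty_iff] at hemp; exact hemp h
      have hcmemS : c ∈ PySem.Set.ofList (g.filter (fun v => decide (v ≠ 0))) := by
        rw [hc]
        obtain ⟨x, t, hxt⟩ := List.exists_cons_of_ne_nil hSne
        rw [hxt]; simp
      have hcg : c ∈ g ∧ c ≠ 0 := by
        have := (PySem.Set.mem_ofList _ _).mp hcmemS
        rw [List.mem_filter] at this
        exact ⟨this.1, by simpa using this.2⟩
      have huniq : ∀ v ∈ g, v ≠ 0 → v = c := fun v hv hv0 => hpre.1 v hv c hcg.1 hv0 hcg.2
      -- an adjacent equal pair exists (Pre_'s second disjunct; the first contradicts c ∈ g)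
      have hadj : ∃ jj : Nat, ∃ h : jj + 1 < g.length,
          g[jj]'(by omega) = c ∧ g[jj + 1]'h = c := by
        rcases hpre.2 with hall | ⟨p, hp, hp1, hp2⟩
        · exact absurd (hall c hcg.1) hcg.2
        · obtain ⟨jj, hjj, hpe⟩ := List.mem_iff_getElem.mp hp
          have hjl : jj + 1 < g.length := by
            have := hjj; rw [List.length_zip, List.length_tail] at this; omega
          refine ⟨jj, hjl, ?_, ?_⟩
          · have h1 : (g.zip g.tail)[jj].1 = g[jj]'(by omega) := by
              rw [List.getElem_zip]
            rw [hpe] at h1; rw [← h1]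
            exact huniq p.1 (by rw [h1]; exact List.getElem_mem _) hp1
          · have h2 : (g.zip g.tail)[jj].2 = g[jj + 1]'hjl := by
              rw [List.getElem_zip]; simp [List.getElem_tail]
            rw [hpe] at h2; rw [← h2, ← hp2]
            exact huniq p.1 (by rw [← hpe, List.getElem_zip]; exact List.getElem_mem _) hp1
      -- the index list of the color
      have hmemI := tbnr_idx_mem g c
      have hIne : ((PySem.List.enumerate g 0).filter (fun p => decide (p.2 = c))).map Prod.fst ≠ [] := by
        obtain ⟨k, hk, hkc⟩ := List.mem_iff_getElem.mp hcg.1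
        intro hnil
        have : (↑k : Int) ∈ ((PySem.List.enumerate g 0).filter (fun p => decide (p.2 = c))).map Prod.fst := by
          rw [hmemI]
          refine ⟨by omega, by exact_mod_cast hk, ?_⟩
          rw [PySem.List.pyGetD_natCast, List.getD_eq_getElem _ _ hk]; exact hkc
        rw [hnil] at this; exact absurd this (List.not_mem_nil)
      obtain ⟨i0, rest, hI⟩ := List.exists_cons_of_ne_nil hIne
      rw [hI]
      simp only []
      have hch : List.IsChain (· < ·) (i0 :: rest) := hI ▸ tbnr_idx_chain g c
      have hfold := tbnr_fold_eq_runs rest i0 i0 1 []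
      simp only [List.nil_append] at hfold
      rw [hfold]
      have hstruct := tbnr_runs_struct rest i0 i0 1 (by ring) (by omega) hch
      have hFM : (tbnrRuns i0 i0 1 rest).flatMap tbnrIval = i0 :: rest := by
        rw [hstruct.1, tbnr_ival_one]; rfl
      obtain ⟨jj, hjl, hj1, hj2⟩ := hadj
      have hgj1 : PySem.List.pyGetD g (↑jj) 0 = c := by
        rw [PySem.List.pyGetD_natCast, List.getD_eq_getElem _ _ (by omega)]; exact hj1
      have hgj2 : PySem.List.pyGetD g ((↑jj : Int) + 1) 0 = c := by
        have : ((↑jj : Int) + 1) = ((jj + 1 : Nat) : Int) := by push_cast; ring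
        rw [this, PySem.List.pyGetD_natCast, List.getD_eq_getElem _ _ hjl]; exact hj2
      have hjI1 : (↑jj : Int) ∈ (tbnrRuns i0 i0 1 rest).flatMap tbnrIval := by
        rw [hFM, ← hI, hmemI]
        exact ⟨by omega, by exact_mod_cast (by omega : jj < g.length), hgj1⟩
      have hjI2 : (↑jj : Int) + 1 ∈ (tbnrRuns i0 i0 1 rest).flatMap tbnrIval := by
        rw [hFM, ← hI, hmemI]
        exact ⟨by omega, by omega, hgj2⟩
      have hbig : ∃ r ∈ tbnrRuns i0 i0 1 rest, 2 ≤ r.2 :=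
        (tbnr_big_run _ hstruct.2.2.1 hstruct.2.1).2 ⟨↑jj, hjI1, hjI2⟩
      -- A's max-run check passes
      have hRne : tbnrRuns i0 i0 1 rest ≠ [] := by
        obtain ⟨l', t, hRc⟩ := hstruct.2.2.2; rw [hRc]; simp
      rcases hmax : PySem.List.max? (tbnrRuns i0 i0 1 rest) (fun r => r.2) with _ | m
      · exact absurd ((PySem.List.max?_eq_none_iff _ _).mp hmax) hRne
      · simp only []
        obtain ⟨r, hr, hr2⟩ := hbig
        have hm2 : r.2 ≤ m.2 := PySem.List.max?_isMax hmax r hr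
        rw [if_neg (by omega)]
        -- B's block-existence check passes
        have hhb : ((PySem.List.pyRange 0 (↑g.length) 1).any (fun i =>
            (PySem.List.pyGetD g i 0 == c)
              && (tbnrAltNb g c (i-1) || tbnrAltNb g c (i+1)))) = true := by
          rw [List.any_eq_true]
          refine ⟨↑jj, (PySem.List.mem_pyRange_one).mpr ⟨by omega, by exact_mod_cast (by omega : jj < g.length)⟩, ?_⟩
          rw [Bool.and_eq_true, beq_iff_eq]
          refine ⟨hgj1, ?_⟩
          rw [Bool.or_eq_true]
          right
          rw [tbnr_nb_iff]
          exact ⟨by omega, by omega, hgj2⟩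
        rw [hhb]
        simp only [Bool.not_true, Bool.false_eq_true, if_false]
        apply List.ext_getElem
        · rw [tbnr_setlen]
          simp [PySem.List.length_pyRange_one]
        intro j hj1 hj2
        have hjg : j < g.length := by rwa [tbnr_setlen] at hj1
        have hpos : ∀ p ∈ ((tbnrRuns i0 i0 1 rest).filter (fun r => decide (r.2 = 1))).map Prod.fst, 0 ≤ p := by
          intro p hp
          obtain ⟨r, hrf, hre⟩ := List.mem_map.mp hp
          rw [List.mem_filter] at hrf
          have hrmem : r.1 ∈ (tbnrRuns i0 i0 1 rest).flatMap tbnrIval :=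
            tbnr_mem_flat.mpr ⟨r, hrf.1, le_refl _, by have := hstruct.2.2.1 r hrf.1; omega⟩
          rw [hFM, ← hI, hmemI] at hrmem
          omega
        rw [tbnr_setget _ g j hjg hpos]
        rw [List.getElem_map, PySem.List.getElem_pyRange_one]
        simp only [zero_add]
        have hg2 : PySem.List.pyGetD g (↑j) 0 = g[j]'hjg := by
          rw [PySem.List.pyGetD_natCast, List.getD_eq_getElem _ _ hjg]
        have hnbFM : ∀ x : Int, (x ∈ (tbnrRuns i0 i0 1 rest).flatMap tbnrIval ↔ tbnrAltNb g c x = true) := by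
          intro x
          rw [hFM, ← hI, hmemI, tbnr_nb_iff]
        have hmemnoise : ((↑j : Int) ∈ ((tbnrRuns i0 i0 1 rest).filter (fun r => decide (r.2 = 1))).map Prod.fst) ↔
            ((↑j : Int), (1 : Int)) ∈ tbnrRuns i0 i0 1 rest := by
          rw [List.mem_map]
          constructor
          · rintro ⟨r, hrf, hre⟩
            rw [List.mem_filter, decide_eq_true_eq] at hrf
            obtain ⟨a, b⟩ := r
            obtain ⟨hmem', hb1⟩ := hrf
            simp only at hre hb1
            subst hre; subst hb1
            exact hmem'
          · intro hmem
            exact ⟨_, List.mem_filter.mpr ⟨hmem, by simp⟩, rfl⟩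
        have hiso := tbnr_isolated _ hstruct.2.2.1 hstruct.2.1 ((↑j : Int))
        have htrip : ∀ x : Int, ((tbnrAltNb g c x = false) ↔ x ∉ (tbnrRuns i0 i0 1 rest).flatMap tbnrIval) := by
          intro x; rw [hnbFM x]; simp
        have hcondR : (((PySem.List.pyGetD g (↑j) 0 == c) && !tbnrAltNb g c ((↑j : Int) - 1) && !tbnrAltNb g c ((↑j : Int) + 1)) = true) ↔
            ((↑j : Int) ∈ (tbnrRuns i0 i0 1 rest).flatMap tbnrIval ∧
             ((↑j : Int) - 1) ∉ (tbnrRuns i0 i0 1 rest).flatMap tbnrIval ∧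
             ((↑j : Int) + 1) ∉ (tbnrRuns i0 i0 1 rest).flatMap tbnrIval) := by
          rw [Bool.and_eq_true, Bool.and_eq_true, beq_iff_eq, Bool.not_eq_true', Bool.not_eq_true', htrip, htrip]
          constructor
          · rintro ⟨⟨h1, h2⟩, h3⟩
            refine ⟨(hnbFM _).mpr ?_, h2, h3⟩
            rw [tbnr_nb_iff]
            exact ⟨by omega, by exact_mod_cast hjg, h1⟩
          · rintro ⟨h1, h2, h3⟩
            have hb := (hnbFM _).mp h1
            rw [tbnr_nb_iff] at hb
            exact ⟨⟨hb.2.2, h2⟩, h3⟩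
        by_cases hcnd : ((↑j : Int), (1 : Int)) ∈ tbnrRuns i0 i0 1 rest
        · rw [if_pos (hmemnoise.mpr hcnd), if_pos (hcondR.mpr (hiso.mp hcnd))]
        · rw [if_neg (fun h => hcnd (hmemnoise.mp h)), if_neg (fun h => hcnd (hiso.mpr (hcondR.mp h)))]
          exact hg2.symm
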